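-- pv_equiv track=rewrite | github.com/Chiki1601/Hackerearth-Solutions | Algorithms/Searching/Binary search/Plus and Minus.py | check
-- ===== SOURCE A (Python) =====
-- from heapq import heapify, heappop, heappush
--
-- def check(x, y, arr):
--     heap = [-x, -y]
--     heapify(heap)
--     ln = len(arr)
--     while len(heap) < ln:
--         u = heappop(heap)
--         v = heappop(heap)
--         heappush(heap, u)
--         heappush(heap, v)
--         heappush(heap, u + v)
--         heappush(heap, u - v)
--     heap = sorted(-i for i in heap)
--     return heap == arr
-- ===== SOURCE B (Python) =====
-- def check(x, y, arr):
--     # Plain list instead of a heap: never remove elements; each round, one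
--     # linear scan finds the two smallest values u <= v, then u+v and u-v are
--     # appended.  (Popping two mins and pushing them back leaves the multiset
--     # unchanged, so growth-only is equivalent.)
--     vals = [-x, -y]
--     n = len(arr)
--     while len(vals) < n:
--         a, b = vals[0], vals[1]
--         if a <= b:
--             u, v = a, b
--         else:
--             u, v = b, a
--         for w in vals[2:]:
--             if w < u:
--                 u, v = w, u
--             elif w < v:
--                 v = w
--         vals.append(u + v)
--         vals.append(u - v)
--     return sorted(-i for i in vals) == arr
-- ===== Notes on version B (the rewrite author's own statement) =====
-- stated objective: alternative
-- what changed: Replaces the heap (pop two mins, push them back with u+v and u-v) by a grow-only plain list: one linear scan per round finds the two smallest values without removing anything, and only u+v and u-v are appended.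
import Mathlib
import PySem

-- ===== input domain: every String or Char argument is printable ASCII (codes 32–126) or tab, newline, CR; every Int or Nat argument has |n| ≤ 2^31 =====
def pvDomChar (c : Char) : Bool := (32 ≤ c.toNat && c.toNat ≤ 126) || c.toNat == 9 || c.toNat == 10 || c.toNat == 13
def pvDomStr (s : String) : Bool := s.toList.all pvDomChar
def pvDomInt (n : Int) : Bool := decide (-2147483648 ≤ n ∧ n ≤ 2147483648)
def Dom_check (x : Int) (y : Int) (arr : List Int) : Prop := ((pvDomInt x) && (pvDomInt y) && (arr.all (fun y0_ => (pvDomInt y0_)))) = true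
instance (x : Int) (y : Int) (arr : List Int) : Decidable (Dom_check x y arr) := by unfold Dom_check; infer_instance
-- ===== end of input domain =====

-- B replaces A's heap (pop two mins, push them back together with u+v, u-v) by a
-- grow-only list scanned linearly for its two smallest values (objective: alternative).

-- ===== PORT A =====
-- heapq is modelled by its multiset semantics: heappop returns the minimum value and
-- removes one occurrence of it, heappush adds an element, heapify is the identity on
-- the multiset.  This is exact here: over Int, only the popped VALUES and the final
-- multiset (read back through sorted) are observable, and ties are value-equal.
def pyMin (l : List Int) : Int :=
  match l with
  | [] => 0            -- unreachable: only called on nonempty lists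
  | h :: t => t.foldl min h

-- termination helper for loopA (cited in its decreasing_by)
lemma pyMin_mem (l : List Int) (h : l ≠ []) : pyMin l ∈ l := by
  rcases l with _ | ⟨a, t⟩
  · exact absurd rfl h
  · simp only [pyMin]
    rcases PySem.List.foldl_min_mem t a with h1 | h1
    · rw [h1]; exact List.mem_cons_self
    · exact List.mem_cons_of_mem _ h1

-- the while loop of A: pop u, pop v, push u, v, u+v, u-v while len(heap) < ln
def loopA (ln : Nat) (heap : List Int) : List Int :=
  if hlt : heap.length < ln then
    match hh : heap with
    | a :: b :: t =>
      let u := pyMin (a :: b :: t)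
      let h1 := (a :: b :: t).erase u
      let v := pyMin h1
      let h2 := h1.erase v
      loopA ln (h2 ++ [u, v, u + v, u - v])
    | other => other   -- unreachable (the heap always has ≥ 2 elements)
  else heap
termination_by ln - heap.length
decreasing_by
  · have hu : pyMin (a :: b :: t) ∈ a :: b :: t := pyMin_mem _ (by simp)
    have h1len : ((a :: b :: t).erase (pyMin (a :: b :: t))).length = t.length + 1 := by
      rw [List.length_erase_of_mem hu]; simp
    have hv : pyMin ((a :: b :: t).erase (pyMin (a :: b :: t))) ∈
        (a :: b :: t).erase (pyMin (a :: b :: t)) :=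
      pyMin_mem _ (by intro hc; simp [hc] at h1len)
    have h2len := List.length_erase_of_mem hv
    simp_all
    omega

def check (x : Int) (y : Int) (arr : List Int) : Bool :=
  let ln := arr.length
  let heap := loopA ln [-x, -y]
  decide (PySem.List.sorted (heap.map (fun i => -i)) (fun z => z) false = arr)

-- ===== PORT B =====
-- the inner for-loop of B: scan vals[2:], keeping the two smallest (p.1 ≤ p.2) seen so far
def scan2 (t : List Int) (p : Int × Int) : Int × Int :=
  t.foldl (fun p w =>
    if w < p.1 then (w, p.1)
    else if w < p.2 then (p.1, w)
    else p) p

-- the while loop of B: append u+v and u-v while len(vals) < n; nothing is removed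
def loopB (n : Nat) (vals : List Int) : List Int :=
  if hlt : vals.length < n then
    match hh : vals with
    | a :: b :: t =>
      let p := if a ≤ b then scan2 t (a, b) else scan2 t (b, a)
      loopB n ((a :: b :: t) ++ [p.1 + p.2, p.1 - p.2])
    | other => other   -- unreachable (vals always has ≥ 2 elements)
  else vals
termination_by n - vals.length
decreasing_by simp_all; omega

def check_alt (x : Int) (y : Int) (arr : List Int) : Bool :=
  let vals := loopB arr.length [-x, -y]
  decide (PySem.List.sorted (vals.map (fun i => -i)) (fun z => z) false = arr)

-- ===== PRECONDITION & SPEC =====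
def Spec_check (x : Int) (y : Int) (arr : List Int) (out : Bool) : Prop := out = check_alt x y arr
instance (x : Int) (y : Int) (arr : List Int) (out : Bool) : Decidable (Spec_check x y arr out) := by unfold Spec_check; infer_instance

-- ===== CLAIM (what is proved, stated in full; the proofs are below) =====
def Claim_equal_check : Prop := ∀ (x : Int) (y : Int) (arr : List Int), Dom_check x y arr → Spec_check x y arr (check x y arr)

-- ===== LEMMAS AND PROOFS =====

lemma pyMin_spec (h : Int) (t : List Int) :
    pyMin (h :: t) ∈ h :: t ∧ ∀ y ∈ h :: t, pyMin (h :: t) ≤ y := by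
  constructor
  · exact pyMin_mem _ (by simp)
  · intro y hy
    simp only [pyMin]
    rcases List.mem_cons.mp hy with rfl | hy
    · exact (PySem.List.foldl_min_le t y).1
    · exact (PySem.List.foldl_min_le t h).2 y hy

lemma pyMin_eq (l : List Int) (m : Int) (hm : m ∈ l) (hlb : ∀ y ∈ l, m ≤ y) :
    pyMin l = m := by
  rcases l with _ | ⟨h, t⟩
  · simp at hm
  · exact le_antisymm ((pyMin_spec h t).2 m hm) (hlb _ (pyMin_spec h t).1)

-- the scan returns the two smallest values of u :: v :: t (u' ≤ v', u' ≤ u, v' ≤ v),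
-- with a remainder r of elements all ≥ v'
lemma scan2_spec (t : List Int) : ∀ u v : Int, u ≤ v →
    ∃ r : List Int,
      (u :: v :: t).Perm ((scan2 t (u, v)).1 :: (scan2 t (u, v)).2 :: r) ∧
      (scan2 t (u, v)).1 ≤ (scan2 t (u, v)).2 ∧
      (scan2 t (u, v)).1 ≤ u ∧ (scan2 t (u, v)).2 ≤ v ∧
      ∀ w ∈ r, (scan2 t (u, v)).2 ≤ w := by
  induction t with
  | nil =>
    intro u v huv
    exact ⟨[], by simp [scan2], by simp [scan2, huv], by simp [scan2], by simp [scan2], by simp⟩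
  | cons w t ih =>
    intro u v huv
    by_cases h1 : w < u
    · have step : scan2 (w :: t) (u, v) = scan2 t (w, u) := by simp [scan2, h1]
      obtain ⟨r, hp, hle, hsu, hsv, hr⟩ := ih w u (le_of_lt h1)
      rw [step]
      refine ⟨v :: r, ?_, hle, by omega, by omega, ?_⟩
      · rw [List.perm_iff_count] at hp ⊢
        intro z
        have := hp z
        simp only [List.count_cons] at this ⊢
        omega
      · intro z hz
        rcases List.mem_cons.mp hz with rfl | hz
        · omega
        · exact hr z hz
    · by_cases h2 : w < v
      · have step : scan2 (w :: t) (u, v) = scan2 t (u, w) := by simp [scan2, h1, h2]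
        obtain ⟨r, hp, hle, hsu, hsv, hr⟩ := ih u w (by omega)
        rw [step]
        refine ⟨v :: r, ?_, hle, by omega, by omega, ?_⟩
        · rw [List.perm_iff_count] at hp ⊢
          intro z
          have := hp z
          simp only [List.count_cons] at this ⊢
          omega
        · intro z hz
          rcases List.mem_cons.mp hz with rfl | hz
          · omega
          · exact hr z hz
      · have step : scan2 (w :: t) (u, v) = scan2 t (u, v) := by simp [scan2, h1, h2]
        obtain ⟨r, hp, hle, hsu, hsv, hr⟩ := ih u v huv
        rw [step]
        refine ⟨w :: r, ?_, hle, by omega, by omega, ?_⟩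
        · rw [List.perm_iff_count] at hp ⊢
          intro z
          have := hp z
          simp only [List.count_cons] at this ⊢
          omega
        · intro z hz
          rcases List.mem_cons.mp hz with rfl | hz
          · omega
          · exact hr z hz

-- main invariant: the two loop states stay permutations of each other
lemma loop_perm (ln : Nat) : ∀ (fuel : Nat) (hA hB : List Int),
    ln - hA.length ≤ fuel → hA.Perm hB → (loopA ln hA).Perm (loopB ln hB) := by
  intro fuel
  induction fuel with
  | zero =>
    intro hA hB hf hp
    have hlen := hp.length_eq
    rw [loopA, loopB, dif_neg (by omega), dif_neg (by omega)]
    exact hp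
  | succ fuel ih =>
    intro hA hB hf hp
    have hlen := hp.length_eq
    by_cases hlt : hA.length < ln
    · rcases hA with _ | ⟨a, _ | ⟨b, t⟩⟩
      · -- degenerate short lists: both loops return their input
        rcases hB with _ | ⟨c, s⟩
        · have e1 : loopA ln [] = [] := by rw [loopA]; split <;> rfl
          have e2 : loopB ln [] = [] := by rw [loopB]; split <;> rfl
          rw [e1, e2]
        · simp at hlen
      · rcases hB with _ | ⟨c, _ | ⟨d, s⟩⟩ <;> simp at hlen
        have e1 : loopA ln [a] = [a] := by rw [loopA]; split <;> rfl
        have e2 : loopB ln [c] = [c] := by rw [loopB]; split <;> rfl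
        rw [e1, e2]
        exact hp
      · rcases hB with _ | ⟨c, _ | ⟨d, s⟩⟩ <;> try (simp at hlen)
        -- both lists have ≥ 2 elements: one round on each side
        rw [loopA, loopB, dif_pos (by simpa using hlt), dif_pos (by simpa [← hlen] using hlt)]
        -- the scan's seeds, ordered
        have hseed : ∃ u0 v0 : Int, u0 ≤ v0 ∧
            (if c ≤ d then scan2 s (c, d) else scan2 s (d, c)) = scan2 s (u0, v0) ∧
            (c :: d :: s).Perm (u0 :: v0 :: s) := by
          by_cases hcd : c ≤ d
          · exact ⟨c, d, hcd, by simp [hcd], List.Perm.refl _⟩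
          · exact ⟨d, c, by omega, by simp [hcd],
              List.Perm.swap d c s⟩
        obtain ⟨u0, v0, h0, hifeq, hperm0⟩ := hseed
        obtain ⟨r, hp2, hle2, _, _, hr2⟩ := scan2_spec s u0 v0 h0
        set p := scan2 s (u0, v0) with hpdef
        -- hA ~ p.1 :: p.2 :: r
        have hp3 : (a :: b :: t).Perm (p.1 :: p.2 :: r) :=
          (hp.trans hperm0).trans hp2
        have hlb : ∀ y ∈ a :: b :: t, p.1 ≤ y := by
          intro y hy
          have := hp3.subset hy
          rcases List.mem_cons.mp this with rfl | h
          · omega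
          · rcases List.mem_cons.mp h with rfl | h
            · exact hle2
            · exact le_trans hle2 (hr2 y h)
        have hu : pyMin (a :: b :: t) = p.1 :=
          pyMin_eq _ _ (hp3.symm.subset (by simp)) hlb
        have hperm_e1 : ((a :: b :: t).erase (pyMin (a :: b :: t))).Perm (p.2 :: r) := by
          rw [hu]
          have := hp3.erase p.1
          simpa using this
        have hv : pyMin ((a :: b :: t).erase (pyMin (a :: b :: t))) = p.2 := by
          apply pyMin_eq
          · exact hperm_e1.symm.subset (by simp)
          · intro y hy
            rcases List.mem_cons.mp (hperm_e1.subset hy) with rfl | h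
            · omega
            · exact hr2 y h
        have hperm_e2 :
            (((a :: b :: t).erase (pyMin (a :: b :: t))).erase
              (pyMin ((a :: b :: t).erase (pyMin (a :: b :: t))))).Perm r := by
          rw [hv]
          have := hperm_e1.erase p.2
          simpa using this
        -- the two successor states are permutations
        have hnext :
            (((a :: b :: t).erase (pyMin (a :: b :: t))).erase
                (pyMin ((a :: b :: t).erase (pyMin (a :: b :: t)))) ++
              [pyMin (a :: b :: t),
               pyMin ((a :: b :: t).erase (pyMin (a :: b :: t))),
               pyMin (a :: b :: t) + pyMin ((a :: b :: t).erase (pyMin (a :: b :: t))),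
               pyMin (a :: b :: t) - pyMin ((a :: b :: t).erase (pyMin (a :: b :: t)))]).Perm
            ((c :: d :: s) ++ [p.1 + p.2, p.1 - p.2]) := by
          rw [hv, hu]
          have hx : ((c :: d :: s) ++ [p.1 + p.2, p.1 - p.2]).Perm
              ((p.1 :: p.2 :: r) ++ [p.1 + p.2, p.1 - p.2]) :=
            List.Perm.append_right _ ((hperm0).trans hp2)
          refine List.Perm.trans ?_ hx.symm
          have hperm_e2' : (((a :: b :: t).erase p.1).erase p.2).Perm r := by
            have := hperm_e2
            rw [hv, hu] at this
            exact this
          have hy : (((a :: b :: t).erase p.1).erase p.2 ++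
              [p.1, p.2, p.1 + p.2, p.1 - p.2]).Perm
              (r ++ [p.1, p.2, p.1 + p.2, p.1 - p.2]) :=
            List.Perm.append_right _ hperm_e2'
          refine hy.trans ?_
          rw [List.perm_iff_count]
          intro z
          simp only [List.count_append, List.count_cons]
          omega
        have hlen2 := hnext.length_eq
        show (loopA ln
            ((((a :: b :: t).erase (pyMin (a :: b :: t))).erase
                (pyMin ((a :: b :: t).erase (pyMin (a :: b :: t))))) ++
              [pyMin (a :: b :: t),
               pyMin ((a :: b :: t).erase (pyMin (a :: b :: t))),
               pyMin (a :: b :: t) + pyMin ((a :: b :: t).erase (pyMin (a :: b :: t))),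
               pyMin (a :: b :: t) - pyMin ((a :: b :: t).erase (pyMin (a :: b :: t)))])).Perm
          (loopB ln ((c :: d :: s) ++
            [(if c ≤ d then scan2 s (c, d) else scan2 s (d, c)).1 +
               (if c ≤ d then scan2 s (c, d) else scan2 s (d, c)).2,
             (if c ≤ d then scan2 s (c, d) else scan2 s (d, c)).1 -
               (if c ≤ d then scan2 s (c, d) else scan2 s (d, c)).2]))
        rw [hifeq]
        refine ih _ _ ?_ ?_
        · rw [hlen2]
          simp only [List.length_append, List.length_cons] at hlt hf ⊢
          omega
        · exact hnext
    · rw [loopA, loopB, dif_neg hlt, dif_neg (by omega)]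
      exact hp

theorem check_eq_alt (x y : Int) (arr : List Int) : check x y arr = check_alt x y arr := by
  unfold check check_alt
  have hperm : (loopA arr.length [-x, -y]).Perm (loopB arr.length [-x, -y]) :=
    loop_perm arr.length arr.length [-x, -y] [-x, -y] (by simp) (List.Perm.refl _)
  have hs : PySem.List.sorted ((loopA arr.length [-x, -y]).map (fun i => -i)) (fun z => z) false
      = PySem.List.sorted ((loopB arr.length [-x, -y]).map (fun i => -i)) (fun z => z) false :=
    PySem.List.sorted_eq_sorted_of_perm _ _ _ (fun a b h => h) (hperm.map _)
  simp only [hs]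

-- ===== VERDICT (by name: the statement is the Claim_ definition above) =====
theorem check_spec : Claim_equal_check := by
  intro x y arr _
  unfold Spec_check
  exact check_eq_alt x y arr
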